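-- pv_equiv track=rewrite | github.com/bellonet/expenses_dashboard | utils.py | manually_match_merchants_and_chunk
-- ===== SOURCE A (Python) =====
-- def manually_match_merchants_and_chunk(merchants, chunk):
--
--     matched_merchants = []
--     for text in chunk:
--         found = False
--         for merchant in merchants:
--             if merchant in text:
--                 matched_merchants.append(merchant)
--                 found = True
--                 break
--         if not found:
--             matched_merchants.append('')
--
--     return matched_merchants
-- ===== SOURCE B (Python) =====
-- def manually_match_merchants_and_chunk(merchants, chunk):
--     # Merchant-major pass: each text slot is filled at most once, by the
--     # earliest merchant (in merchant-list order) whose name occurs in it.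
--     slots = [[text, None] for text in chunk]
--     for merchant in merchants:
--         for slot in slots:
--             if slot[1] is None and merchant in slot[0]:
--                 slot[1] = merchant
--     return [m if m is not None else '' for _, m in slots]
-- ===== Notes on version B (the rewrite author's own statement) =====
-- stated objective: alternative
-- what changed: Inverted the loop nesting: instead of scanning the merchant list per text with a break, B makes one pass per merchant over fill-once text slots, so each text keeps the first merchant (in list order) that occurs in it.
import Mathlib
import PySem

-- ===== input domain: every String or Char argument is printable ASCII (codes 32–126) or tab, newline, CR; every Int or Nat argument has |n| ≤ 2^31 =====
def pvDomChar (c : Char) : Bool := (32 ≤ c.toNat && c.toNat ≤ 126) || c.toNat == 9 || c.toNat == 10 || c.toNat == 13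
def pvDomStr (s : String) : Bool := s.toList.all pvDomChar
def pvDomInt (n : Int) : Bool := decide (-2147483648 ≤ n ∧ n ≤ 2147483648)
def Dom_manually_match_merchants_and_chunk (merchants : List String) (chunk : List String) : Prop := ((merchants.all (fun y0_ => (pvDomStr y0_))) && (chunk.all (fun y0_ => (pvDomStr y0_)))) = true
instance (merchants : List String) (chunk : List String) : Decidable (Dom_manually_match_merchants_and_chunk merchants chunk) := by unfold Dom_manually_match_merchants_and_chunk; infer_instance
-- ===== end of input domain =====

-- B inverts the loop nesting: one pass per merchant over fill-once text slots instead of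
-- a per-text scan of the merchant list with a break; objective: alternative traversal.


-- ===== PORT A =====
-- inner 'for merchant in merchants: … break' with the 'found' flag: first match, none = not found
def pvFirstMatch (merchants : List String) (text : String) : Option String :=
  match merchants with
  | [] => none
  | m :: rest => if PySem.Str.isIn m text then some m else pvFirstMatch rest text

def manually_match_merchants_and_chunk (merchants : List String) (chunk : List String) : List String :=
  chunk.foldl (fun matched_merchants text =>
    match pvFirstMatch merchants text with
    | some m => matched_merchants ++ [m]
    | none => matched_merchants ++ [""]) []

-- ===== PORT B =====
-- one slot per text: (text, assigned merchant?); a merchant fills every still-empty slot it occurs in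
def pvFillSlot (m : String) (slot : String × Option String) : String × Option String :=
  if slot.2 = none ∧ PySem.Str.isIn m slot.1 then (slot.1, some m) else slot

def manually_match_merchants_and_chunk_alt (merchants : List String) (chunk : List String) : List String :=
  let slots := chunk.map (fun text => (text, (none : Option String)))
  let final := merchants.foldl (fun sl m => sl.map (pvFillSlot m)) slots
  final.map (fun slot => match slot.2 with | some m => m | none => "")

-- ===== PRECONDITION & SPEC =====
def Spec_manually_match_merchants_and_chunk (merchants : List String) (chunk : List String) (out : List String) : Prop := out = manually_match_merchants_and_chunk_alt merchants chunk
instance (merchants : List String) (chunk : List String) (out : List String) : Decidable (Spec_manually_match_merchants_and_chunk merchants chunk out) := by unfold Spec_manually_match_merchants_and_chunk; infer_instance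

-- ===== CLAIM (what is proved, stated in full; the proofs are below) =====
def Claim_equal_manually_match_merchants_and_chunk : Prop := ∀ (merchants : List String) (chunk : List String), Dom_manually_match_merchants_and_chunk merchants chunk → Spec_manually_match_merchants_and_chunk merchants chunk (manually_match_merchants_and_chunk merchants chunk)

-- ===== LEMMAS AND PROOFS =====

-- a fold of per-element maps is the map of the per-element fold
theorem foldl_map_comm (ms : List String) (l : List (String × Option String)) :
    ms.foldl (fun sl m => sl.map (pvFillSlot m)) l
      = l.map (fun s => ms.foldl (fun s m => pvFillSlot m s) s) := by
  induction ms generalizing l with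
  | nil => simp
  | cons m rest ih => simp [ih, Function.comp_def]

-- a filled slot never changes again
theorem foldl_fill_some (ms : List String) (t m : String) :
    ms.foldl (fun s m => pvFillSlot m s) (t, some m) = (t, some m) := by
  induction ms with
  | nil => rfl
  | cons m' rest ih => simpa [pvFillSlot] using ih

-- the per-slot fold computes the first matching merchant
theorem foldl_fill_none (ms : List String) (t : String) :
    ms.foldl (fun s m => pvFillSlot m s) (t, none)
      = (t, pvFirstMatch ms t) := by
  induction ms with
  | nil => rfl
  | cons m rest ih =>
    by_cases h : PySem.Chars.isIn m.toList t.toList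
    · have h1 : pvFillSlot m (t, (none : Option String)) = (t, some m) := by simp [pvFillSlot, h]
      rw [List.foldl_cons, h1, foldl_fill_some]
      simp [pvFirstMatch, h]
    · have h1 : pvFillSlot m (t, (none : Option String)) = (t, none) := by simp [pvFillSlot, h]
      rw [List.foldl_cons, h1, ih]
      simp [pvFirstMatch, h]

-- A, written as the map it accumulates
theorem portA_eq_map (merchants chunk : List String) :
    manually_match_merchants_and_chunk merchants chunk
      = chunk.map (fun text => match pvFirstMatch merchants text with
          | some m => m | none => "") := by
  unfold manually_match_merchants_and_chunk
  induction chunk using List.reverseRecOn with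
  | nil => rfl
  | append_singleton xs x ih =>
    rw [List.foldl_append, List.map_append, ih]
    cases h : pvFirstMatch merchants x <;> simp [h]

-- ===== VERDICT (by name: the statement is the Claim_ definition above) =====
theorem manually_match_merchants_and_chunk_spec : Claim_equal_manually_match_merchants_and_chunk := by
  intro merchants chunk _
  unfold Spec_manually_match_merchants_and_chunk manually_match_merchants_and_chunk_alt
  simp only [portA_eq_map, foldl_map_comm, List.map_map]
  exact List.map_congr_left fun t _ => by simp [Function.comp_def, foldl_fill_none]
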